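-- pv_equiv track=rewrite | github.com/Cyxuan0311/PNANA | python/utils/utils.py | clean_diff_content
-- ===== SOURCE A (Python) =====
-- def clean_diff_content(diff_content: str, max_lines: int = 1000) -> str:
--     """Clean and truncate diff content for processing."""
--     lines = diff_content.split('\n')
--
--     # Remove binary file diffs
--     cleaned_lines = []
--     skip_binary = False
--
--     for line in lines:
--         if line.startswith('diff --git'):
--             skip_binary = False
--         elif 'Binary files' in line or 'GIT binary patch' in line:
--             skip_binary = True
--             continue
--
--         if not skip_binary:
--             cleaned_lines.append(line)
--
--     # Truncate if too long
--     if len(cleaned_lines) > max_lines: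
--         truncated = cleaned_lines[:max_lines//2] + \
--                    ['... (diff truncated due to length) ...'] + \
--                    cleaned_lines[-(max_lines//2):]
--         cleaned_lines = truncated
--
--     return '\n'.join(cleaned_lines)
-- ===== SOURCE B (Python) =====
-- def clean_diff_content(diff_content: str, max_lines: int = 1000) -> str:
--     """Clean and truncate diff content for processing."""
--     lines = diff_content.split('\n')
--
--     # Partition into per-file segments at 'diff --git' headers; within each
--     # segment's body, keep only the lines before the first binary marker.
--     cleaned_lines = []
--     i, n = 0, len(lines)
--     while i < n:
--         if lines[i].startswith('diff --git'):
--             cleaned_lines.append(lines[i])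
--             i += 1
--         body = []
--         while i < n and not lines[i].startswith('diff --git'):
--             body.append(lines[i])
--             i += 1
--         for k, ln in enumerate(body):
--             if 'Binary files' in ln or 'GIT binary patch' in ln:
--                 body = body[:k]
--                 break
--         cleaned_lines.extend(body)
--
--     # Truncate if too long
--     if len(cleaned_lines) > max_lines:
--         cleaned_lines = cleaned_lines[:max_lines//2] + \
--             ['... (diff truncated due to length) ...'] + \
--             cleaned_lines[-(max_lines//2):]
--
--     return '\n'.join(cleaned_lines)
-- ===== Notes on version B (the rewrite author's own statement) =====
-- stated objective: alternative
-- what changed: Replaces A's single pass with a mutable skip_binary flag by a segment decomposition: the line list is partitioned at 'diff --git' headers and each segment body is cut at its first binary marker; same truncation.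
import Mathlib
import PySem

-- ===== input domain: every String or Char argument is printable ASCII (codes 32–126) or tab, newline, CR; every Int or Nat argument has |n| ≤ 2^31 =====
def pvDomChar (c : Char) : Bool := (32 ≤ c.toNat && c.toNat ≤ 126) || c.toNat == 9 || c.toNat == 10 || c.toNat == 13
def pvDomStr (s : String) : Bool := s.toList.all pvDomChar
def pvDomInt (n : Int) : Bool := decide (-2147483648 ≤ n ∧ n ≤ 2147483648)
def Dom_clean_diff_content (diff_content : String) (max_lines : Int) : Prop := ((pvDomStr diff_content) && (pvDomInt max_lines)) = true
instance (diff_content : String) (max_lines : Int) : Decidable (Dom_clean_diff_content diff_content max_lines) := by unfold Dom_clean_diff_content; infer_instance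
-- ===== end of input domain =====

-- B replaces A's skip_binary-flag loop by a per-file segment decomposition (alternative structure, same cost).

-- ===== PORT A =====
-- state: (cleaned_lines, skip_binary); one fold step = one iteration of A's for-loop
def pvStepA (st : List String × Bool) (line : String) : List String × Bool :=
  if PySem.Str.startswith line "diff --git" then
    (st.1 ++ [line], false)            -- skip_binary = False; then appended (not skipping)
  else if PySem.Str.isIn "Binary files" line || PySem.Str.isIn "GIT binary patch" line then
    (st.1, true)                       -- skip_binary = True; continue
  else if st.2 then (st.1, st.2) else (st.1 ++ [line], st.2)

def clean_diff_content (diff_content : String) (max_lines : Int) : String :=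
  let lines := (PySem.Str.split? diff_content "\n").getD []  -- sep is nonempty so split? = some
  let cleaned := (lines.foldl pvStepA ([], false)).1
  let cleaned :=
    if (cleaned.length : Int) > max_lines then
      PySem.List.slice cleaned none (some (PySem.Int.floordiv max_lines 2))
        ++ ["... (diff truncated due to length) ..."]
        ++ PySem.List.slice cleaned (some (-(PySem.Int.floordiv max_lines 2))) none
    else cleaned
  PySem.Str.join "\n" cleaned

-- ===== PORT B =====
def pvIsHdr (l : String) : Bool := PySem.Str.startswith l "diff --git"

def pvIsMarker (l : String) : Bool :=
  PySem.Str.isIn "Binary files" l || PySem.Str.isIn "GIT binary patch" l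

-- inner while: (body lines before the next 'diff --git', remaining lines)
def pvTakeBody : List String → List String × List String
  | [] => ([], [])
  | l :: ls =>
    if pvIsHdr l then ([], l :: ls)
    else
      let p := pvTakeBody ls
      (l :: p.1, p.2)

-- the for/enumerate/break: keep the body lines before the first binary marker
def pvCutMarker : List String → List String
  | [] => []
  | l :: ls => if pvIsMarker l then [] else l :: pvCutMarker ls

theorem pvTakeBody_snd_length : ∀ ls : List String, (pvTakeBody ls).2.length ≤ ls.length := by
  intro ls
  induction ls with
  | nil => simp [pvTakeBody]
  | cons l ls ih =>
    by_cases h : pvIsHdr l = true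
    · simp [pvTakeBody, h]
    · simp only [pvTakeBody, h]
      simpa using Nat.le_succ_of_le ih

-- outer while-loop of B
def pvCleanB : List String → List String
  | [] => []
  | l :: ls =>
    if pvIsHdr l then
      (l :: pvCutMarker (pvTakeBody ls).1) ++ pvCleanB (pvTakeBody ls).2
    else
      pvCutMarker (l :: (pvTakeBody ls).1) ++ pvCleanB (pvTakeBody ls).2
termination_by ls => ls.length
decreasing_by
  · exact Nat.lt_succ_of_le (pvTakeBody_snd_length ls)
  · exact Nat.lt_succ_of_le (pvTakeBody_snd_length ls)

def clean_diff_content_alt (diff_content : String) (max_lines : Int) : String :=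
  let lines := (PySem.Str.split? diff_content "\n").getD []  -- sep is nonempty so split? = some
  let cleaned := pvCleanB lines
  let cleaned :=
    if (cleaned.length : Int) > max_lines then
      PySem.List.slice cleaned none (some (PySem.Int.floordiv max_lines 2))
        ++ ["... (diff truncated due to length) ..."]
        ++ PySem.List.slice cleaned (some (-(PySem.Int.floordiv max_lines 2))) none
    else cleaned
  PySem.Str.join "\n" cleaned

-- ===== PRECONDITION & SPEC =====
def Spec_clean_diff_content (diff_content : String) (max_lines : Int) (out : String) : Prop := out = clean_diff_content_alt diff_content max_lines
instance (diff_content : String) (max_lines : Int) (out : String) : Decidable (Spec_clean_diff_content diff_content max_lines out) := by unfold Spec_clean_diff_content; infer_instance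

-- ===== CLAIM (what is proved, stated in full; the proofs are below) =====
def Claim_equal_clean_diff_content : Prop := ∀ (diff_content : String) (max_lines : Int), Dom_clean_diff_content diff_content max_lines → Spec_clean_diff_content diff_content max_lines (clean_diff_content diff_content max_lines)

-- ===== LEMMAS AND PROOFS =====

-- pvTakeBody decomposes its input: body ++ rest = ls
theorem pvTakeBody_append : ∀ ls : List String, (pvTakeBody ls).1 ++ (pvTakeBody ls).2 = ls := by
  intro ls
  induction ls with
  | nil => simp [pvTakeBody]
  | cons l ls ih =>
    by_cases h : pvIsHdr l = true
    · simp [pvTakeBody, h]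
    · simp [pvTakeBody, h, ih]

theorem pvTakeBody_fst_nohdr : ∀ ls : List String, ∀ x ∈ (pvTakeBody ls).1, pvIsHdr x = false := by
  intro ls
  induction ls with
  | nil => simp [pvTakeBody]
  | cons l ls ih =>
    by_cases h : pvIsHdr l = true
    · simp [pvTakeBody, h]
    · simp only [pvTakeBody, h, if_neg, Bool.not_eq_true]
      intro x hx
      rcases List.mem_cons.mp hx with rfl | hx
      · simpa using h
      · exact ih x hx

-- the remainder is empty or starts with a header line
theorem pvTakeBody_snd_shape : ∀ ls : List String,
    (pvTakeBody ls).2 = [] ∨ ∃ h t, (pvTakeBody ls).2 = h :: t ∧ pvIsHdr h = true := by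
  intro ls
  induction ls with
  | nil => simp [pvTakeBody]
  | cons l ls ih =>
    by_cases h : pvIsHdr l = true
    · exact Or.inr ⟨l, ls, by simp [pvTakeBody, h], h⟩
    · simpa [pvTakeBody, h] using ih

-- once skip_binary is true, a run of non-header lines changes nothing
theorem pvFoldA_skip (ls : List String) (acc : List String)
    (hno : ∀ x ∈ ls, pvIsHdr x = false) :
    ls.foldl pvStepA (acc, true) = (acc, true) := by
  induction ls with
  | nil => rfl
  | cons l ls ih =>
    have hl : pvIsHdr l = false := hno l (by simp)
    have hrest : ∀ x ∈ ls, pvIsHdr x = false := fun x hx => hno x (List.mem_cons_of_mem _ hx)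
    have : pvStepA (acc, true) l = (acc, true) := by
      simp [pvStepA, pvIsHdr] at hl ⊢
      simp [hl]
    rw [List.foldl_cons, this]
    exact ih hrest

-- a run of non-header lines starting with skip_binary = false keeps exactly the pre-marker prefix
theorem pvFoldA_body (ls : List String) (acc : List String)
    (hno : ∀ x ∈ ls, pvIsHdr x = false) :
    ∃ b, ls.foldl pvStepA (acc, false) = (acc ++ pvCutMarker ls, b) := by
  induction ls generalizing acc with
  | nil => exact ⟨false, by simp [pvCutMarker]⟩
  | cons l ls ih =>
    have hl : pvIsHdr l = false := hno l (by simp)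
    have hrest : ∀ x ∈ ls, pvIsHdr x = false := fun x hx => hno x (List.mem_cons_of_mem _ hx)
    by_cases hm : pvIsMarker l = true
    · refine ⟨true, ?_⟩
      have hstep : pvStepA (acc, false) l = (acc, true) := by
        simp [pvStepA, pvIsHdr, pvIsMarker] at hl hm ⊢
        simp [hl, hm]
      simp only [List.foldl_cons, hstep, pvFoldA_skip ls acc hrest, pvCutMarker, hm]
      simp
    · have hstep : pvStepA (acc, false) l = (acc ++ [l], false) := by
        simp [pvStepA, pvIsHdr, pvIsMarker] at hl hm ⊢
        simp [hl, hm]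
      obtain ⟨b, hb⟩ := ih (acc := acc ++ [l]) hrest
      refine ⟨b, ?_⟩
      simp only [List.foldl_cons, hstep, hb, pvCutMarker, hm]
      simp

-- main invariant: on a list that is empty or header-headed, A's loop from any skip state
-- produces exactly acc ++ B's segment decomposition
theorem pvFoldA_main : ∀ n (ls : List String), ls.length ≤ n →
    (ls = [] ∨ ∃ h t, ls = h :: t ∧ pvIsHdr h = true) →
    ∀ acc b, (ls.foldl pvStepA (acc, b)).1 = acc ++ pvCleanB ls := by
  intro n
  induction n with
  | zero =>
    intro ls hlen _ acc b
    have : ls = [] := List.eq_nil_of_length_eq_zero (Nat.le_zero.mp hlen)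
    subst this; simp [pvCleanB]
  | succ n ih =>
    intro ls hlen hshape acc b
    rcases hshape with rfl | ⟨h, t, rfl, hh⟩
    · simp [pvCleanB]
    · have hstep : pvStepA (acc, b) h = (acc ++ [h], false) := by
        simp [pvStepA, pvIsHdr] at hh ⊢
        simp [hh]
      have hsplit := pvTakeBody_append t
      obtain ⟨b', hb'⟩ := pvFoldA_body (pvTakeBody t).1 (acc ++ [h]) (pvTakeBody_fst_nohdr t)
      have hlen2 : (pvTakeBody t).2.length ≤ n := by
        have := pvTakeBody_snd_length t
        simp at hlen
        omega
      have hrec := ih (pvTakeBody t).2 hlen2 (pvTakeBody_snd_shape t)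
        (acc ++ [h] ++ pvCutMarker (pvTakeBody t).1) b'
      calc ((h :: t).foldl pvStepA (acc, b)).1
          = (t.foldl pvStepA (acc ++ [h], false)).1 := by rw [List.foldl_cons, hstep]
        _ = (((pvTakeBody t).1 ++ (pvTakeBody t).2).foldl pvStepA (acc ++ [h], false)).1 := by
              rw [hsplit]
        _ = ((pvTakeBody t).2.foldl pvStepA (acc ++ [h] ++ pvCutMarker (pvTakeBody t).1, b')).1 := by
              rw [List.foldl_append, hb']
        _ = acc ++ [h] ++ pvCutMarker (pvTakeBody t).1 ++ pvCleanB (pvTakeBody t).2 := hrec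
        _ = acc ++ pvCleanB (h :: t) := by
              rw [pvCleanB]
              simp [hh]

-- top level: A's loop from the initial state equals B's decomposition on any list
theorem pvFoldA_top (ls : List String) :
    (ls.foldl pvStepA ([], false)).1 = pvCleanB ls := by
  cases ls with
  | nil => simp [pvCleanB]
  | cons l t =>
    by_cases hh : pvIsHdr l = true
    · simpa using pvFoldA_main (l :: t).length (l :: t) le_rfl (Or.inr ⟨l, t, rfl, hh⟩) [] false
    · have hsplit := pvTakeBody_append t
      have hstep : pvStepA (([] : List String), false) l = pvStepA ([], false) l := rfl
      obtain ⟨b', hb'⟩ := pvFoldA_body (l :: (pvTakeBody t).1) []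
        (by
          intro x hx
          rcases List.mem_cons.mp hx with rfl | hx
          · simpa using hh
          · exact pvTakeBody_fst_nohdr t x hx)
      have hrec := pvFoldA_main (pvTakeBody t).2.length (pvTakeBody t).2 le_rfl
        (pvTakeBody_snd_shape t) (pvCutMarker (l :: (pvTakeBody t).1)) b'
      calc ((l :: t).foldl pvStepA ([], false)).1
          = (((l :: (pvTakeBody t).1) ++ (pvTakeBody t).2).foldl pvStepA ([], false)).1 := by
              rw [List.cons_append, hsplit]
        _ = ((pvTakeBody t).2.foldl pvStepA (([] : List String) ++ pvCutMarker (l :: (pvTakeBody t).1), b')).1 := by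
              rw [List.foldl_append, hb']
        _ = ([] : List String) ++ pvCutMarker (l :: (pvTakeBody t).1) ++ pvCleanB (pvTakeBody t).2 := hrec
        _ = pvCleanB (l :: t) := by
              rw [pvCleanB]
              simp [hh]

-- ===== VERDICT (by name: the statement is the Claim_ definition above) =====
theorem clean_diff_content_spec : Claim_equal_clean_diff_content := by
  intro diff_content max_lines _
  unfold Spec_clean_diff_content clean_diff_content clean_diff_content_alt
  simp only [pvFoldA_top]
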